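-- pv_equiv track=rewrite | github.com/Echochef/Wisdom-math | llm_generate/eval_tools/util.py | _fix_sqrt
-- ===== SOURCE A (Python) =====
-- def _fix_sqrt(string):
--     if "\\sqrt" not in string:
--         return string
--     splits = string.split("\\sqrt")
--     new_string = splits[0]
--     for split in splits[1:]:
--         if split and split[0] != "{":
--             a = split[0]
--             new_substr = "\\sqrt{" + a + "}" + split[1:]
--         else:
--             new_substr = "\\sqrt" + split
--         new_string += new_substr
--     return new_string
-- ===== SOURCE B (Python) =====
-- def _fix_sqrt(string):
--     out = []
--     i = 0
--     n = len(string)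
--     while i < n:
--         if string.startswith("\\sqrt", i):
--             i += 5
--             if i < n and string[i] != "{" and not string.startswith("\\sqrt", i):
--                 out.append("\\sqrt{" + string[i] + "}")
--                 i += 1
--             else:
--                 out.append("\\sqrt")
--         else:
--             out.append(string[i])
--             i += 1
--     return "".join(out)
-- ===== Notes on version B (the rewrite author's own statement) =====
-- stated objective: alternative
-- what changed: Replaces the split-on-\sqrt-then-rejoin loop by a single left-to-right character scan that wraps the character after each \sqrt (unless it is '{' or the start of another \sqrt) as it copies the string.
import Mathlib
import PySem

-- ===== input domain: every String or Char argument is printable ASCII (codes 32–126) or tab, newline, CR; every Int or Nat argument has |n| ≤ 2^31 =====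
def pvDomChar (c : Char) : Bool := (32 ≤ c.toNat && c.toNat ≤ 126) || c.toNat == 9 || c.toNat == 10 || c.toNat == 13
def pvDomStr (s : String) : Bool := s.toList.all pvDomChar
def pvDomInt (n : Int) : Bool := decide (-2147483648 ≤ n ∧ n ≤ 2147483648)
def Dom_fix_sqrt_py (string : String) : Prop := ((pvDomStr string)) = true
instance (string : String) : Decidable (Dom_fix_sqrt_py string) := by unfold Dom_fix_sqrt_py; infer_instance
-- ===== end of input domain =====

-- B replaces A's split-on-"\sqrt"-then-rejoin loop by a single left-to-right scan; same return value, no side effects (alternative, not faster).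

def pvSqrt : List Char := ['\\', 's', 'q', 'r', 't']

theorem pvSqrt_le_length {l : List Char} (h : pvSqrt.isPrefixOf l) : 5 ≤ l.length :=
  (List.isPrefixOf_iff_prefix.mp h).length_le

-- ===== PORT A =====
-- literal port of A: guard with 'in', str.split("\sqrt"), then a fold over splits[1:]
def fix_sqrt_py (string : String) : String :=
  if PySem.Str.isIn "\\sqrt" string = false then string
  else
    let splits := PySem.Chars.splitOn string.toList pvSqrt
    -- splits[0]: str.split always returns at least one piece, so headD's default is never used
    let new_string := splits.headD []
    String.ofList ((splits.drop 1).foldl (fun new_string split =>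
      let new_substr :=
        match split with
        | c :: rest => if c ≠ '{' then pvSqrt ++ '{' :: c :: '}' :: rest else pvSqrt ++ (c :: rest)
        | [] => pvSqrt ++ []
      new_string ++ new_substr) new_string)

-- ===== PORT B =====
-- literal port of Source B's while-loop scan (index i becomes the remaining suffix l;
-- after "\sqrt" is matched, the 'i < n and s[i] != "{" and not startswith' test becomes
-- the test on l.drop 5, and the else branch resumes the loop at l.drop 5)
def pvScan (l : List Char) : List Char :=
  if h : pvSqrt.isPrefixOf l then
    if l.drop 5 ≠ [] ∧ (l.drop 5).headD ' ' ≠ '{' ∧ ¬ pvSqrt.isPrefixOf (l.drop 5) then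
      pvSqrt ++ '{' :: (l.drop 5).headD ' ' :: '}' :: pvScan (l.drop 6)
    else
      pvSqrt ++ pvScan (l.drop 5)
  else
    match l with
    | c :: rest => c :: pvScan rest
    | [] => []
termination_by l.length
decreasing_by
  · have := pvSqrt_le_length h
    have : (l.drop 6).length = l.length - 6 := List.length_drop ..
    omega
  · have := pvSqrt_le_length h
    have : (l.drop 5).length = l.length - 5 := List.length_drop ..
    omega
  · simp

def fix_sqrt_py_alt (string : String) : String :=
  String.ofList (pvScan string.toList)

-- ===== PRECONDITION & SPEC =====
def Spec_fix_sqrt_py (string : String) (out : String) : Prop := out = fix_sqrt_py_alt string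
instance (string : String) (out : String) : Decidable (Spec_fix_sqrt_py string out) := by unfold Spec_fix_sqrt_py; infer_instance

-- ===== CLAIM (what is proved, stated in full; the proofs are below) =====
def Claim_equal_fix_sqrt_py : Prop := ∀ (string : String), Dom_fix_sqrt_py string → Spec_fix_sqrt_py string (fix_sqrt_py string)

-- ===== LEMMAS AND PROOFS =====

-- clean recursion computing str.split(l, "\sqrt")
def pySplitSqrt (l : List Char) : List (List Char) :=
  if h : pvSqrt.isPrefixOf l then [] :: pySplitSqrt (l.drop 5)
  else
    match l with
    | [] => [[]]
    | c :: rest => (pySplitSqrt rest).modifyHead (c :: ·)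
termination_by l.length
decreasing_by
  · have := pvSqrt_le_length h
    have : (l.drop 5).length = l.length - 5 := List.length_drop ..
    omega
  · simp

-- equation lemmas for pySplitSqrt and pvScan
theorem pySplitSqrt_nil : pySplitSqrt [] = [[]] := by
  rw [pySplitSqrt, dif_neg (by decide)]

theorem pySplitSqrt_pos {l : List Char} (h : pvSqrt.isPrefixOf l) :
    pySplitSqrt l = [] :: pySplitSqrt (l.drop 5) := by
  rw [pySplitSqrt, dif_pos h]

theorem pySplitSqrt_neg {c : Char} {rest : List Char} (h : ¬ pvSqrt.isPrefixOf (c :: rest)) :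
    pySplitSqrt (c :: rest) = (pySplitSqrt rest).modifyHead (c :: ·) := by
  rw [pySplitSqrt, dif_neg h]

theorem pvScan_nil : pvScan [] = [] := by
  rw [pvScan, dif_neg (by decide)]

theorem pvScan_pos_wrap {l : List Char} (h : pvSqrt.isPrefixOf l)
    (hc : l.drop 5 ≠ [] ∧ (l.drop 5).headD ' ' ≠ '{' ∧ ¬ pvSqrt.isPrefixOf (l.drop 5)) :
    pvScan l = pvSqrt ++ '{' :: (l.drop 5).headD ' ' :: '}' :: pvScan (l.drop 6) := by
  rw [pvScan, dif_pos h, if_pos hc]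

theorem pvScan_pos_plain {l : List Char} (h : pvSqrt.isPrefixOf l)
    (hc : ¬ (l.drop 5 ≠ [] ∧ (l.drop 5).headD ' ' ≠ '{' ∧ ¬ pvSqrt.isPrefixOf (l.drop 5))) :
    pvScan l = pvSqrt ++ pvScan (l.drop 5) := by
  rw [pvScan, dif_pos h, if_neg hc]

theorem pvScan_neg_cons {c : Char} {rest : List Char} (h : ¬ pvSqrt.isPrefixOf (c :: rest)) :
    pvScan (c :: rest) = c :: pvScan rest := by
  rw [pvScan, dif_neg h]

theorem pySplitSqrt_ne_nil (l : List Char) : pySplitSqrt l ≠ [] := by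
  induction l with
  | nil => rw [pySplitSqrt_nil]; simp
  | cons c rest ih =>
    by_cases h : pvSqrt.isPrefixOf (c :: rest)
    · rw [pySplitSqrt_pos h]; simp
    · rw [pySplitSqrt_neg h]
      rcases hq : pySplitSqrt rest with _ | ⟨q, qs⟩
      · exact absurd hq ih
      · simp

-- A's loop body on one piece of splits[1:]
def ruleA : List Char → List Char
  | c :: rest => if c ≠ '{' then pvSqrt ++ '{' :: c :: '}' :: rest else pvSqrt ++ (c :: rest)
  | [] => pvSqrt ++ []

-- A's whole rebuild, as a function of the split pieces
def joinA : List (List Char) → List Char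
  | [] => []
  | p :: ps => p ++ (ps.map ruleA).flatten

-- PySem's fuel-based str.split agrees with the clean recursion
theorem splitOn_go_eq (fuel : Nat) (l cur : List Char) (acc : List (List Char))
    (h : l.length < fuel) :
    PySem.Chars.splitOn.go pvSqrt fuel l cur acc
      = acc.reverse ++ (pySplitSqrt l).modifyHead (cur.reverse ++ ·) := by
  induction fuel generalizing l cur acc with
  | zero => omega
  | succ n ih =>
    match l with
    | [] =>
      simp [PySem.Chars.splitOn.go, pySplitSqrt_nil]
    | c :: rest =>
      rw [PySem.Chars.splitOn.go]
      by_cases hp : pvSqrt.isPrefixOf (c :: rest)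
      · rw [if_pos hp]
        have h5 : 5 ≤ (c :: rest).length := pvSqrt_le_length hp
        have hd : List.drop pvSqrt.length (c :: rest) = List.drop 5 (c :: rest) := rfl
        rw [hd]
        have hlen : ((c :: rest).drop 5).length < n := by
          have : ((c :: rest).drop 5).length = (c :: rest).length - 5 := List.length_drop ..
          omega
        rw [ih _ _ _ hlen]
        rw [pySplitSqrt_pos hp]
        rcases hq : pySplitSqrt ((c :: rest).drop 5) with _ | ⟨q, qs⟩
        · exact absurd hq (pySplitSqrt_ne_nil _)
        · simp
      · rw [if_neg hp]
        rw [ih rest (c :: cur) acc (by simpa using Nat.lt_of_succ_lt_succ h)]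
        rw [pySplitSqrt_neg hp]
        rcases hq : pySplitSqrt rest with _ | ⟨q, qs⟩
        · exact absurd hq (pySplitSqrt_ne_nil _)
        · simp

theorem splitOn_eq (l : List Char) :
    PySem.Chars.splitOn l pvSqrt = pySplitSqrt l := by
  unfold PySem.Chars.splitOn
  rw [splitOn_go_eq _ _ _ _ (by omega)]
  rcases hq : pySplitSqrt l with _ | ⟨q, qs⟩
  · exact absurd hq (pySplitSqrt_ne_nil _)
  · simp

-- B's scan equals A's rebuild of the split pieces
theorem scan_eq_joinA_aux (n : Nat) : ∀ l : List Char, l.length < n → pvScan l = joinA (pySplitSqrt l) := by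
  induction n with
  | zero => intro l hl; omega
  | succ n ih =>
    intro l hl
    by_cases h : pvSqrt.isPrefixOf l
    · have h5 : 5 ≤ l.length := pvSqrt_le_length h
      have hd5 : (l.drop 5).length = l.length - 5 := List.length_drop ..
      rw [pySplitSqrt_pos h]
      by_cases hc : l.drop 5 ≠ [] ∧ (l.drop 5).headD ' ' ≠ '{' ∧ ¬ pvSqrt.isPrefixOf (l.drop 5)
      · obtain ⟨hne, hbrace, hnp⟩ := hc
        rw [pvScan_pos_wrap h ⟨hne, hbrace, hnp⟩]
        rcases hdrop : l.drop 5 with _ | ⟨d, rest'⟩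
        · exact absurd hdrop hne
        · rw [hdrop] at hbrace hnp
          simp only [List.headD_cons] at hbrace ⊢
          rw [pySplitSqrt_neg hnp]
          have h6 : l.drop 6 = rest' := by
            have : l.drop 6 = (l.drop 5).drop 1 := by simp [List.drop_drop]
            rw [this, hdrop]; rfl
          have hlen' : rest'.length < n := by
            have := congrArg List.length hdrop
            simp at this
            omega
          rw [h6, ih rest' hlen']
          rcases hq : pySplitSqrt rest' with _ | ⟨q, qs⟩
          · exact absurd hq (pySplitSqrt_ne_nil _)
          · simp [joinA, ruleA, hbrace]
      · rw [pvScan_pos_plain h hc]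
        have hlen : (l.drop 5).length < n := by omega
        rw [ih _ hlen]
        rcases hdrop : l.drop 5 with _ | ⟨d, rest'⟩
        · rw [pySplitSqrt_nil]
          simp [joinA, ruleA]
        · by_cases hp : pvSqrt.isPrefixOf (d :: rest')
          · rw [pySplitSqrt_pos hp]
            rcases hq : pySplitSqrt ((d :: rest').drop 5) with _ | ⟨q, qs⟩
            · exact absurd hq (pySplitSqrt_ne_nil _)
            · simp [joinA, ruleA]
          · have hdch : d = '{' := by
              by_contra hd
              exact hc ⟨by rw [hdrop]; simp,
                        by rw [hdrop]; simpa using hd,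
                        by rw [hdrop]; exact hp⟩
            rw [pySplitSqrt_neg hp]
            rcases hq : pySplitSqrt rest' with _ | ⟨q, qs⟩
            · exact absurd hq (pySplitSqrt_ne_nil _)
            · simp [joinA, ruleA, hdch]

    · rcases l with _ | ⟨c, rest⟩
      · rw [pvScan_nil, pySplitSqrt_nil]; simp [joinA]
      · rw [pvScan_neg_cons h, pySplitSqrt_neg h]
        rw [ih rest (by simp at hl; omega)]
        rcases hq : pySplitSqrt rest with _ | ⟨q, qs⟩
        · exact absurd hq (pySplitSqrt_ne_nil _)
        · simp [joinA]

theorem scan_eq_joinA (l : List Char) : pvScan l = joinA (pySplitSqrt l) :=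
  scan_eq_joinA_aux (l.length + 1) l (by omega)

-- when "\sqrt" does not occur, the scan copies the string unchanged
theorem scan_of_not_infix (l : List Char) (h : ¬ pvSqrt <:+: l) : pvScan l = l := by
  induction l with
  | nil => exact pvScan_nil
  | cons c rest ih =>
    have hp : ¬ pvSqrt.isPrefixOf (c :: rest) := by
      intro hp
      exact h (List.IsPrefix.isInfix (List.isPrefixOf_iff_prefix.mp hp))
    rw [pvScan_neg_cons hp]
    have : ¬ pvSqrt <:+: rest := fun hi => h (hi.trans (List.suffix_cons c rest).isInfix)
    rw [ih this]

-- A's fold over splits[1:] is the flat concatenation of ruleA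
theorem foldl_ruleA (ps : List (List Char)) (a : List Char) :
    ps.foldl (fun new_string split =>
      let new_substr :=
        match split with
        | c :: rest => if c ≠ '{' then pvSqrt ++ '{' :: c :: '}' :: rest else pvSqrt ++ (c :: rest)
        | [] => pvSqrt ++ []
      new_string ++ new_substr) a = a ++ (ps.map ruleA).flatten := by
  induction ps generalizing a with
  | nil => simp
  | cons p ps ih =>
    simp only [List.foldl_cons, ih, List.map_cons, List.flatten_cons, List.append_assoc]
    rfl

-- ===== VERDICT (by name: the statement is the Claim_ definition above) =====
theorem fix_sqrt_py_spec : Claim_equal_fix_sqrt_py := by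
  intro string _
  unfold Spec_fix_sqrt_py fix_sqrt_py fix_sqrt_py_alt
  by_cases hin : PySem.Str.isIn "\\sqrt" string = false
  · rw [if_pos hin]
    have hni : ¬ pvSqrt <:+: string.toList := by
      have := PySem.Chars.isIn_eq_false_iff (sub := "\\sqrt".toList) (s := string.toList)
      simp only [PySem.Str.isIn] at hin
      have h2 := this.mp (by simpa using hin)
      simpa [pvSqrt] using h2
    rw [scan_of_not_infix _ hni]
    exact String.ofList_toList.symm
  · rw [if_neg hin]
    rw [splitOn_eq, scan_eq_joinA]
    rcases hq : pySplitSqrt string.toList with _ | ⟨q, qs⟩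
    · exact absurd hq (pySplitSqrt_ne_nil _)
    · simp only [List.headD_cons, List.drop_one, List.tail_cons]
      rw [foldl_ruleA]
      simp [joinA]
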